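-- pv_equiv track=rewrite | github.com/gonmace/magoreal | scripts/regen_and_keyhole.py | split_subpaths
-- ===== SOURCE A (Python) =====
-- def split_subpaths(commands):
--     subs, cur = [], []
--     for cmd in commands:
--         if cmd[0] == 'M':
--             if cur: subs.append(cur)
--             cur = [cmd]
--         else:
--             cur.append(cmd)
--     if cur: subs.append(cur)
--     return subs
-- ===== SOURCE B (Python) =====
-- def split_subpaths(commands):
--     boundaries = [i for i, cmd in enumerate(commands) if cmd[0] == 'M']
--     if commands and (not boundaries or boundaries[0] != 0):
--         boundaries = [0] + boundaries
--     ends = boundaries[1:] + [len(commands)]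
--     return [commands[a:b] for a, b in zip(boundaries, ends)]
-- ===== Notes on version B (the rewrite author's own statement) =====
-- stated objective: alternative
-- what changed: Replaces A's accumulator loop (growing a current subpath and flushing it at each 'M') by a boundary-index decomposition: collect the indices of 'M' commands, prepend 0 when the path does not already start at an 'M', and slice the list between consecutive boundaries.
-- outside the precondition, e.g. on split_subpaths([['M', '0'], []]): A raises IndexError, B raises IndexError
import Mathlib
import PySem

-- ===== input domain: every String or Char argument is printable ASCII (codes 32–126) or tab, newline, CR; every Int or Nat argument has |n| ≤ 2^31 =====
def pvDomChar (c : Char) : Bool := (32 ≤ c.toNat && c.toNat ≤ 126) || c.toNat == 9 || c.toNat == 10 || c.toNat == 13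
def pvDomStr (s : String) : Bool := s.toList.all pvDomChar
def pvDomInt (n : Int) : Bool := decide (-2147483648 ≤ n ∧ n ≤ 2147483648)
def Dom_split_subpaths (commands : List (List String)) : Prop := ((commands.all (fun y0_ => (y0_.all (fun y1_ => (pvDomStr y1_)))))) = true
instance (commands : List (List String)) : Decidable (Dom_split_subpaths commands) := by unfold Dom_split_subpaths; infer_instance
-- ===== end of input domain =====

-- B replaces A's accumulator loop by a different decomposition: collect the 'M' boundary
-- indices, prepend 0 when the path does not already start at an 'M', and slice between
-- consecutive boundaries (objective: alternative decomposition, same cost).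

-- cmd[0] == 'M' (Python raises IndexError on an empty cmd; such inputs are outside Pre_)
def pvIsM (cmd : List String) : Bool := PySem.List.pyGet? cmd 0 == some "M"

-- ===== PORT A =====
def pvAStep (st : List (List (List String)) × List (List String)) (cmd : List String) :
    List (List (List String)) × List (List String) :=
  if pvIsM cmd then
    (if st.2 ≠ [] then st.1 ++ [st.2] else st.1, [cmd])
  else
    (st.1, st.2 ++ [cmd])

def split_subpaths (commands : List (List String)) : List (List (List String)) :=
  let st := commands.foldl pvAStep ([], [])
  if st.2 ≠ [] then st.1 ++ [st.2] else st.1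

-- ===== PORT B =====
-- boundaries = [i for i, cmd in enumerate(commands) if cmd[0] == 'M']
def pvBoundaries (commands : List (List String)) : List Int :=
  ((PySem.List.enumerate commands).filter (fun p => pvIsM p.2)).map (·.1)

-- boundaries, prepended with 0 when the list is non-empty and does not start at an 'M'
def pvBs (commands : List (List String)) : List Int :=
  if commands ≠ [] ∧ (pvBoundaries commands = [] ∨ (pvBoundaries commands).head? ≠ some 0) then
    0 :: pvBoundaries commands
  else pvBoundaries commands

def split_subpaths_alt (commands : List (List String)) : List (List (List String)) :=
  ((pvBs commands).zip ((pvBs commands).tail ++ [(commands.length : Int)])).map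
    (fun p => PySem.List.slice commands (some p.1) (some p.2))

-- ===== PRECONDITION & SPEC =====
-- Pre_ excludes exactly the inputs containing an empty command, on which Python's cmd[0] raises IndexError.
def Pre_split_subpaths (commands : List (List String)) : Prop :=
  ∀ cmd ∈ commands, cmd ≠ []
instance (commands : List (List String)) : Decidable (Pre_split_subpaths commands) := by
  unfold Pre_split_subpaths; infer_instance

def pvWitness_split_subpaths : List (List String) :=
  [["M", "0", "0"], ["L", "1", "1"], ["M", "2", "2"], ["C", "3", "3"]]

def Spec_split_subpaths (commands : List (List String)) (out : List (List (List String))) : Prop := out = split_subpaths_alt commands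
instance (commands : List (List String)) (out : List (List (List String))) : Decidable (Spec_split_subpaths commands out) := by unfold Spec_split_subpaths; infer_instance

-- ===== CLAIM (what is proved, stated in full; the proofs are below) =====
def Claim_equal_split_subpaths : Prop := ∀ (commands : List (List String)), Dom_split_subpaths commands → Pre_split_subpaths commands → Spec_split_subpaths commands (split_subpaths commands)

-- ===== LEMMAS AND PROOFS =====

-- recursive characterisation both ports are proved equal to: head command plus the
-- following non-'M' commands form a subpath, then recurse on the rest
def pvChop : List (List String) → List (List (List String))
  | [] => []
  | c :: rest =>
    (c :: rest.takeWhile (fun x => !pvIsM x)) ::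
      pvChop (rest.dropWhile (fun x => !pvIsM x))
termination_by l => l.length
decreasing_by
  simp only [List.length_cons]
  exact Nat.lt_succ_of_le (List.length_dropWhile_le _ _)

-- Nat-valued boundary indices, for reasoning about port B
def pvIdx (s : Nat) : List (List String) → List Nat
  | [] => []
  | c :: l => if pvIsM c then s :: pvIdx (s+1) l else pvIdx (s+1) l

-- commands[a:b] for 0 ≤ a ≤ b
def pvSl (L : List (List String)) (a b : Nat) : List (List String) := (L.drop a).take (b - a)

def pvCast (l : List Nat) : List Int := l.map (fun n : Nat => (n : Int))

theorem pvIdx_shift (l : List (List String)) : ∀ s : Nat, pvIdx (s+1) l = (pvIdx s l).map (· + 1) := by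
  induction l with
  | nil => intro s; simp [pvIdx]
  | cons c l ih =>
      intro s
      by_cases h : pvIsM c <;> simp [pvIdx, h, ih (s+1), ih s]

theorem pvIdx_empty (l : List (List String)) : ∀ s : Nat, pvIdx s l = [] →
    l.takeWhile (fun x => !pvIsM x) = l ∧ l.dropWhile (fun x => !pvIsM x) = [] := by
  induction l with
  | nil => intro s _; simp
  | cons c l ih =>
      intro s h
      by_cases hc : pvIsM c
      · simp [pvIdx, hc] at h
      · simp only [pvIdx, hc] at h
        have := ih (s+1) (by simpa [hc] using h)
        simp [hc, this.1, this.2]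

theorem pvEnum_cast (l : List (List String)) : ∀ s : Nat,
    ((PySem.List.enumerate l (s : Int)).filter (fun p => pvIsM p.2)).map (·.1)
      = pvCast (pvIdx s l) := by
  induction l with
  | nil => intro s; simp [PySem.List.enumerate_nil, pvIdx, pvCast]
  | cons c l ih =>
      intro s
      have ih' := ih (s+1)
      rw [show ((s + 1 : Nat) : Int) = (s : Int) + 1 by push_cast; ring] at ih'
      rw [PySem.List.enumerate_cons, List.filter_cons]
      by_cases hc : pvIsM c
      · simp only [hc, if_pos, List.map_cons, ih', pvIdx]
        rfl
      · simp only [pvIdx, hc, if_false, Bool.false_eq_true]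
        exact ih' 

theorem pvZipShift (v w : List Nat) :
    (v.map (· + 1)).zip (w.map (· + 1))
      = (v.zip w).map (fun p => (p.1 + 1, p.2 + 1)) := by
  rw [List.zip_map]
  exact List.map_congr_left (fun p _ => by cases p; rfl)

theorem pvMapSl (x : List String) (L : List (List String)) (ps : List (Nat × Nat)) :
    (ps.map (fun p => (p.1 + 1, p.2 + 1))).map (fun p => pvSl (x :: L) p.1 p.2)
      = ps.map (fun p => pvSl L p.1 p.2) := by
  rw [List.map_map]
  exact List.map_congr_left (fun p _ => by simp [pvSl, Nat.succ_sub_succ])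

theorem pvMain (rest : List (List String)) : ∀ c : List String,
    ((0 :: pvIdx 1 rest).zip (pvIdx 1 rest ++ [rest.length + 1])).map
        (fun p => pvSl (c :: rest) p.1 p.2)
      = pvChop (c :: rest) := by
  induction rest with
  | nil =>
      intro c
      rw [pvChop]
      simp only [pvIdx, List.length_nil, List.nil_append, List.zip_cons_cons, List.zip_nil_left,
        List.map_cons, List.map_nil, List.takeWhile_nil, List.dropWhile_nil]
      rw [pvChop]
      simp [pvSl]
  | cons d rest2 ih =>
      intro c
      have hshift : pvIdx 2 rest2 = (pvIdx 1 rest2).map (· + 1) := pvIdx_shift rest2 1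
      by_cases hd : pvIsM d
      · -- boundary at d: first subpath is [c], rest as for (d :: rest2)
        have hidx : pvIdx 1 (d :: rest2) = (0 :: pvIdx 1 rest2).map (· + 1) := by
          simp [pvIdx, hd, hshift]
        have hsnd : pvIdx 1 (d :: rest2) ++ [(d :: rest2).length + 1]
            = 1 :: ((pvIdx 1 rest2 ++ [rest2.length + 1]).map (· + 1)) := by
          simp [hidx]
        rw [hsnd, hidx, List.zip_cons_cons, pvZipShift]
        simp only [List.map_cons]
        rw [pvMapSl c (d :: rest2) _, ih d]
        have h01 : pvSl (c :: d :: rest2) 0 1 = [c] := by simp [pvSl]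
        rw [h01]
        conv_rhs => rw [pvChop]
        simp [hd]
      · -- no boundary at d: c's subpath absorbs d
        have hidx : pvIdx 1 (d :: rest2) = (pvIdx 1 rest2).map (· + 1) := by
          simp [pvIdx, hd, hshift]
        rcases hu : pvIdx 1 rest2 with _ | ⟨j, u'⟩
        · -- no 'M' anywhere: a single subpath
          have hall := pvIdx_empty rest2 1 hu
          have ht : (d :: rest2).takeWhile (fun x => !pvIsM x) = d :: rest2 := by
            simp [hd, hall.1]
          have hdw : (d :: rest2).dropWhile (fun x => !pvIsM x) = [] := by
            simp [hd, hall.2]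
          rw [pvChop, ht, hdw, pvChop]
          simp [hidx, hu, pvSl, List.take_of_length_le]
        · -- first boundary strictly inside rest2
          have hsnd : pvIdx 1 (d :: rest2) ++ [(d :: rest2).length + 1]
              = (j + 1) :: ((u' ++ [rest2.length + 1]).map (· + 1)) := by
            simp [hidx, hu]
          have hfst : (0 : Nat) :: pvIdx 1 (d :: rest2)
              = 0 :: (j + 1) :: (u'.map (· + 1)) := by
            simp [hidx, hu]
          rw [hsnd, hfst, List.zip_cons_cons]
          rw [show ((j+1) :: u'.map (· + 1)) = (j :: u').map (· + 1) by simp]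
          rw [pvZipShift]
          simp only [List.map_cons]
          rw [pvMapSl c (d :: rest2) _]
          have hih := ih d
          rw [hu, List.cons_append, List.zip_cons_cons] at hih
          conv_rhs at hih => rw [pvChop]
          simp only [List.map_cons, List.cons.injEq] at hih
          obtain ⟨hih1, hih2⟩ := hih
          conv_rhs => rw [pvChop]
          rw [List.cons.injEq]
          constructor
          · have : pvSl (c :: d :: rest2) 0 (j + 1) = c :: pvSl (d :: rest2) 0 j := by
              simp [pvSl]
            rw [this, hih1]
            simp [hd]
          · rw [hih2]
            simp [hd]

theorem pvZipSliceCast (L : List (List String)) (v w : List Nat) :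
    ((pvCast v).zip (pvCast w)).map (fun p => PySem.List.slice L (some p.1) (some p.2))
      = (v.zip w).map (fun p => pvSl L p.1 p.2) := by
  rw [show pvCast v = v.map (fun n : Nat => (n : Int)) from rfl,
      show pvCast w = w.map (fun n : Nat => (n : Int)) from rfl,
      @List.zip_map Nat Int Nat Int (fun n : Nat => (n : Int)) (fun n : Nat => (n : Int)) v w,
      List.map_map]
  exact List.map_congr_left (fun p _ => by
    cases p with
    | mk a b => simp [Prod.map, PySem.List.slice_natCast, pvSl])

theorem pvBoundaries_cast (l : List (List String)) : pvBoundaries l = pvCast (pvIdx 0 l) := by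
  have h := pvEnum_cast l 0
  rw [Nat.cast_zero] at h
  exact h

theorem pvBs_cast (c : List String) (rest : List (List String)) :
    pvBs (c :: rest) = pvCast (0 :: pvIdx 1 rest) := by
  unfold pvBs
  rw [pvBoundaries_cast]
  by_cases hc : pvIsM c
  · have h0 : pvIdx 0 (c :: rest) = 0 :: pvIdx 1 rest := by simp [pvIdx, hc]
    rw [h0]
    simp [pvCast]
  · have h0 : pvIdx 0 (c :: rest) = (pvIdx 0 rest).map (· + 1) := by
      simp [pvIdx, hc, pvIdx_shift rest 0]
    have hne : (pvCast (pvIdx 0 (c :: rest))).head? ≠ some 0 := by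
      rw [h0]
      cases pvIdx 0 rest with
      | nil => simp [pvCast]
      | cons a t =>
          simp only [pvCast, List.map_cons, List.head?_cons, ne_eq, Option.some.injEq]
          omega
    rw [if_pos ⟨by simp, Or.inr hne⟩, h0, pvIdx_shift rest 0]
    simp [pvCast]

-- port B computes pvChop
theorem pvAlt_eq_chop (commands : List (List String)) :
    split_subpaths_alt commands = pvChop commands := by
  cases commands with
  | nil => simp [split_subpaths_alt, pvBs, pvBoundaries, pvChop, PySem.List.enumerate_nil]
  | cons c rest =>
      unfold split_subpaths_alt
      rw [pvBs_cast]
      have htail : (pvCast (0 :: pvIdx 1 rest)).tail ++ [((c :: rest).length : Int)]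
          = pvCast (pvIdx 1 rest ++ [rest.length + 1]) := by
        simp only [pvCast, List.map_cons, List.map_append, List.map_nil, List.tail_cons,
          List.length_cons]
      rw [htail]
      rw [pvZipSliceCast (c :: rest) (0 :: pvIdx 1 rest) (pvIdx 1 rest ++ [rest.length + 1])]
      exact pvMain rest c

-- A's loop invariant: with a non-empty current subpath, finishing the fold appends
-- (current ++ leading non-'M' commands) and then chops the remainder
theorem pvA_invariant (l : List (List String)) :
    ∀ (subs : List (List (List String))) (cur : List (List String)), cur ≠ [] →
      (let st := l.foldl pvAStep (subs, cur);
       if st.2 ≠ [] then st.1 ++ [st.2] else st.1)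
        = subs ++ ((cur ++ l.takeWhile (fun x => !pvIsM x)) ::
            pvChop (l.dropWhile (fun x => !pvIsM x))) := by
  induction l with
  | nil =>
      intro subs cur hcur
      simp only [List.foldl_nil, List.takeWhile_nil, List.dropWhile_nil]
      rw [pvChop]
      simp [hcur]
  | cons c l ih =>
      intro subs cur hcur
      by_cases hc : pvIsM c
      · have hstep : pvAStep (subs, cur) c = (subs ++ [cur], [c]) := by
          simp [pvAStep, hc, hcur]
        simp only [List.foldl_cons, hstep]
        rw [ih (subs ++ [cur]) [c] (by simp)]
        rw [show (c :: l).takeWhile (fun x => !pvIsM x) = [] by simp [hc],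
            show (c :: l).dropWhile (fun x => !pvIsM x) = c :: l by simp [hc]]
        conv_rhs => rw [pvChop]
        simp
      · have hstep : pvAStep (subs, cur) c = (subs, cur ++ [c]) := by
          simp [pvAStep, hc]
        simp only [List.foldl_cons, hstep]
        rw [ih subs (cur ++ [c]) (by simp)]
        simp [hc]

-- port A computes pvChop
theorem pvA_eq_chop (commands : List (List String)) :
    split_subpaths commands = pvChop commands := by
  cases commands with
  | nil => simp [split_subpaths, pvChop]
  | cons c rest =>
      unfold split_subpaths
      have hfirst : pvAStep ([], []) c = ([], [c]) := by
        by_cases hc : pvIsM c <;> simp [pvAStep, hc]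
      simp only [List.foldl_cons, hfirst]
      rw [pvA_invariant rest [] [c] (by simp)]
      conv_rhs => rw [pvChop]
      simp

-- ===== VERDICT (by name: the statement is the Claim_ definition above) =====
theorem split_subpaths_spec : Claim_equal_split_subpaths := by
  intro commands _ _
  unfold Spec_split_subpaths
  rw [pvA_eq_chop, pvAlt_eq_chop]
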